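-- pv_equiv track=rewrite | github.com/grizillar/django-demo | dashboard/scripts/handler.py | formPeriodRange
-- ===== SOURCE A (Python) =====
-- def formPeriodRange(period, year):
--     if len(period) == 1:
--         return (period, year)
--
--     start_period = int(period[0])
--     start_year = int(year[0])
--     end_period = int(period[1])
--     end_year = int(year[1])
--
--     periods = []
--     years = []
--     year_diff = end_year - start_year
--
--     if year_diff < 0:
--         return (periods, years)
--     if year_diff == 0:
--         for i in range(start_period, end_period+1):
--             periods.append(i)
--             years.append(start_year)
--     if year_diff > 0:
--         p = start_period
--         y = start_year
--         while y < end_year: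
--             if p == 13:
--                 periods.append(p)
--                 years.append(y)
--                 y += 1
--                 p = 1
--             else:
--                 periods.append(p)
--                 years.append(y)
--                 p += 1
--         for i in range(1, end_period+1):
--             periods.append(i)
--             years.append(end_year)
--     return (periods, years)
-- ===== SOURCE B (Python) =====
-- def formPeriodRange(period, year):
--     if len(period) == 1:
--         return (period, year)
--     sp = int(period[0]); sy = int(year[0])
--     ep = int(period[1]); ey = int(year[1])
--     yd = ey - sy
--     if yd < 0:
--         return ([], [])
--     if yd == 0:
--         ps = [sp + k for k in range(ep - sp + 1)]
--         return (ps, [sy] * len(ps))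
--     # random-access closed form: the k-th entry of the answer is computed
--     # directly from k by index arithmetic (divmod), no sequential state
--     c0 = 14 - sp              # entries emitted in the start year
--     mid = 13 * (yd - 1)       # entries in the full interior years
--     total = c0 + mid + max(ep, 0)
--     def entry(k):
--         if k < c0:
--             return (sp + k, sy)
--         j = k - c0
--         if j < mid:
--             return (j % 13 + 1, sy + 1 + j // 13)
--         return (j - mid + 1, ey)
--     pairs = [entry(k) for k in range(total)]
--     return ([p for p, _ in pairs], [y for _, y in pairs])
-- ===== Notes on version B (the rewrite author's own statement) =====
-- stated objective: alternative
-- what changed: Replaces A's stateful sequential enumeration (a flat while-loop with mutable wrap-at-13 period/year counters plus a trailing for-loop) by a random-access closed form: the k-th output entry is computed directly from the index k by divmod arithmetic, and the whole answer is one map over range(total).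
import Mathlib
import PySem

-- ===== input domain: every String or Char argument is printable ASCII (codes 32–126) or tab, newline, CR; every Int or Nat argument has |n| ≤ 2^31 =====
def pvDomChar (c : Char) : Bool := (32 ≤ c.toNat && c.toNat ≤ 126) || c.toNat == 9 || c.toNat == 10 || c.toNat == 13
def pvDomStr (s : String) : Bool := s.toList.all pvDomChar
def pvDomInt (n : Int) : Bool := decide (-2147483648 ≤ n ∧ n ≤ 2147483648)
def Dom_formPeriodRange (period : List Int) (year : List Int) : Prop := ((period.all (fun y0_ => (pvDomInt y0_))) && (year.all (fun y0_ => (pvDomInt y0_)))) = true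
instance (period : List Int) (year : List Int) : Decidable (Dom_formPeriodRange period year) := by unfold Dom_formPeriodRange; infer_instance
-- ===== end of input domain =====

-- B replaces A's stateful sequential enumeration by a random-access closed form:
-- each entry is computed directly from its index by divmod arithmetic (objective: alternative).

-- ===== PORT A =====
-- the while-loop of A, fuelled (the fuel below is exactly the trip count whenever
-- start_period ≤ 13; when start_period > 13 and years remain, Python A never terminates,
-- which Pre_ excludes)
def loopA : Nat → Int → Int → Int → List Int → List Int → List Int × List Int
  | 0, _, _, _, ps, ys => (ps, ys)
  | fuel+1, p, y, ey, ps, ys =>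
    if y < ey then
      if p = 13 then loopA fuel 1 (y+1) ey (ps ++ [p]) (ys ++ [y])
      else loopA fuel (p+1) y ey (ps ++ [p]) (ys ++ [y])
    else (ps, ys)

def fuelA : Nat → Int → Nat
  | 0, _ => 0
  | n+1, p => (13 - p).toNat + 1 + fuelA n 1

def formPeriodRange (period : List Int) (year : List Int) : List Int × List Int :=
  if period.length = 1 then (period, year) else
  let sp := PySem.List.pyGetD period 0 0
  let sy := PySem.List.pyGetD year 0 0
  let ep := PySem.List.pyGetD period 1 0
  let ey := PySem.List.pyGetD year 1 0
  let yd := ey - sy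
  if yd < 0 then ([], [])
  else if yd = 0 then
    (PySem.List.pyRange sp (ep+1) 1).foldl (fun a i => (a.1 ++ [i], a.2 ++ [sy])) ([], [])
  else
    let r := loopA (fuelA yd.toNat sp) sp sy ey [] []
    (PySem.List.pyRange 1 (ep+1) 1).foldl (fun a i => (a.1 ++ [i], a.2 ++ [ey])) r

-- ===== PORT B =====
-- the Python closure entry(k): the k-th output entry, directly from the index k
def entryB (sp sy ey c0 mid : Int) (k : Int) : Int × Int :=
  if k < c0 then (sp + k, sy)
  else
    let j := k - c0
    if j < mid then (PySem.Int.mod j 13 + 1, sy + 1 + PySem.Int.floordiv j 13)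
    else (j - mid + 1, ey)

def formPeriodRange_alt (period : List Int) (year : List Int) : List Int × List Int :=
  if period.length = 1 then (period, year) else
  let sp := PySem.List.pyGetD period 0 0
  let sy := PySem.List.pyGetD year 0 0
  let ep := PySem.List.pyGetD period 1 0
  let ey := PySem.List.pyGetD year 1 0
  let yd := ey - sy
  if yd < 0 then ([], [])
  else if yd = 0 then
    let ps := (PySem.List.pyRange 0 (ep - sp + 1) 1).map (fun k => sp + k)
    (ps, List.replicate ps.length sy)
  else
    let c0 := 14 - sp
    let mid := 13 * (yd - 1)
    let total := c0 + mid + max ep 0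
    let pairs := (PySem.List.pyRange 0 total 1).map (entryB sp sy ey c0 mid)
    (pairs.map Prod.fst, pairs.map Prod.snd)

-- ===== PRECONDITION & SPEC =====
-- Pre_ excludes exactly the inputs where Python A never returns: missing first/second
-- elements (IndexError), and start_period > 13 with end_year > start_year, on which A's
-- while-loop never reaches 13 and diverges.
def Pre_formPeriodRange (period : List Int) (year : List Int) : Prop :=
  period.length = 1 ∨
  (2 ≤ period.length ∧ 2 ≤ year.length ∧
    (PySem.List.pyGetD year 1 0 ≤ PySem.List.pyGetD year 0 0 ∨ PySem.List.pyGetD period 0 0 ≤ 13))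
instance (period : List Int) (year : List Int) : Decidable (Pre_formPeriodRange period year) := by unfold Pre_formPeriodRange; infer_instance

def pvWitness_formPeriodRange : List Int × List Int := ([11, 3], [2020, 2022])

def Spec_formPeriodRange (period : List Int) (year : List Int) (out : List Int × List Int) : Prop := out = formPeriodRange_alt period year
instance (period : List Int) (year : List Int) (out : List Int × List Int) : Decidable (Spec_formPeriodRange period year out) := by unfold Spec_formPeriodRange; infer_instance

-- ===== CLAIM (what is proved, stated in full; the proofs are below) =====
def Claim_equal_formPeriodRange : Prop := ∀ (period : List Int) (year : List Int), Dom_formPeriodRange period year → Pre_formPeriodRange period year → Spec_formPeriodRange period year (formPeriodRange period year)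

-- ===== LEMMAS AND PROOFS =====

-- the common spine both programs build for the year_diff > 0 case
def chunks : Nat → Int → Int → List Int × List Int
  | 0, _, _ => ([], [])
  | n+1, p, y =>
    let c := chunks n 1 (y+1)
    (PySem.List.pyRange p 14 1 ++ c.1,
     List.replicate (PySem.List.pyRange p 14 1).length y ++ c.2)

theorem foldl_append_pair (L : List Int) (y : Int) :
    ∀ acc : List Int × List Int,
      L.foldl (fun b p => (b.1 ++ [p], b.2 ++ [y])) acc
        = (acc.1 ++ L, acc.2 ++ List.replicate L.length y) := by
  induction L with
  | nil => intro acc; simp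
  | cons x xs ih =>
    intro acc
    simp only [List.foldl_cons, ih, List.length_cons, List.replicate_succ]
    simp

theorem loopA_succ (fuel : Nat) (p y ey : Int) (ps ys : List Int) :
    loopA (fuel+1) p y ey ps ys
      = if y < ey then
          (if p = 13 then loopA fuel 1 (y+1) ey (ps ++ [p]) (ys ++ [y])
           else loopA fuel (p+1) y ey (ps ++ [p]) (ys ++ [y]))
        else (ps, ys) := rfl

theorem loopA_year (ey : Int) : ∀ (k fuel : Nat) (p y : Int) (ps ys : List Int),
    p ≤ 13 → (13 - p).toNat = k → y < ey →
    loopA (fuel + k + 1) p y ey ps ys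
      = loopA fuel 1 (y+1) ey (ps ++ PySem.List.pyRange p 14 1)
          (ys ++ List.replicate (k+1) y) := by
  intro k
  induction k with
  | zero =>
    intro fuel p y ps ys hp hk hy
    have hp13 : p = 13 := by omega
    subst hp13
    rw [show fuel + 0 + 1 = fuel + 1 from rfl, loopA_succ, if_pos hy, if_pos rfl]
    have h13 : PySem.List.pyRange 13 14 1 = [13] := by decide
    rw [h13]
    simp
  | succ k ih =>
    intro fuel p y ps ys hp hk hy
    have hne : p ≠ 13 := by omega
    rw [show fuel + (k+1) + 1 = (fuel + k + 1) + 1 from by omega, loopA_succ,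
        if_pos hy, if_neg hne]
    rw [ih fuel (p+1) y (ps ++ [p]) (ys ++ [y]) (by omega) (by omega) hy]
    rw [PySem.List.pyRange_one_cons (by omega : p < (14:Int))]
    simp [List.replicate_succ]

theorem loopA_chunks (ey : Int) : ∀ (n : Nat) (p y : Int) (ps ys : List Int),
    p ≤ 13 → (ey - y).toNat = n →
    loopA (fuelA n p) p y ey ps ys
      = (ps ++ (chunks n p y).1, ys ++ (chunks n p y).2) := by
  intro n
  induction n with
  | zero =>
    intro p y ps ys hp hn
    simp only [fuelA, loopA, chunks, List.append_nil]
  | succ n ih =>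
    intro p y ps ys hp hn
    have hy : y < ey := by omega
    have hfuel : fuelA (n+1) p = fuelA n 1 + (13 - p).toNat + 1 := by
      simp only [fuelA]; omega
    rw [hfuel, loopA_year ey (13 - p).toNat (fuelA n 1) p y ps ys hp rfl hy]
    rw [ih 1 (y+1) _ _ (by omega) (by omega)]
    have hlen : (PySem.List.pyRange p 14 1).length = (13 - p).toNat + 1 := by
      rw [PySem.List.length_pyRange_one]; omega
    simp only [chunks, hlen, List.append_assoc]

-- pyRange a b 1 as a shift of a zero-based range
theorem shiftRange (a b : Int) :
    PySem.List.pyRange a b 1 = (PySem.List.pyRange 0 (b - a) 1).map (fun k => a + k) := by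
  rw [PySem.List.pyRange_one, PySem.List.pyRange_one, List.map_map]
  simp

-- the middle (interior-years) piece of chunks as a closed-form map
theorem chunks_mid : ∀ (n : Nat) (y : Int),
    chunks n 1 y
      = ((PySem.List.pyRange 0 (13*n) 1).map (fun j => PySem.Int.mod j 13 + 1),
         (PySem.List.pyRange 0 (13*n) 1).map (fun j => y + PySem.Int.floordiv j 13)) := by
  intro n
  induction n with
  | zero =>
    intro y
    rw [show ((13*(0:Nat) : Int)) = 0 by norm_num, PySem.List.pyRange_one_eq_nil le_rfl]
    simp [chunks]
  | succ n ih =>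
    intro y
    have hcast : ((13*(n+1:Nat) : Int)) = 13*((n:Int)+1) := by push_cast; ring
    have hsplit : PySem.List.pyRange 0 (13*((n:Int)+1)) 1
        = PySem.List.pyRange 0 13 1 ++ PySem.List.pyRange 13 (13*((n:Int)+1)) 1 :=
      PySem.List.pyRange_one_append 0 13 _ (by omega) (by omega)
    have hshift : PySem.List.pyRange 13 (13*((n:Int)+1)) 1
        = (PySem.List.pyRange 0 (13*(n:Int)) 1).map (fun k => 13 + k) := by
      rw [shiftRange 13 (13*((n:Int)+1)), show 13*((n:Int)+1) - 13 = 13*(n:Int) by omega]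
    have hheadP : (PySem.List.pyRange 0 13 1).map (fun j => PySem.Int.mod j 13 + 1)
        = PySem.List.pyRange 1 14 1 := by decide
    have htailP : ((PySem.List.pyRange 0 (13*(n:Int)) 1).map (fun k => 13 + k)).map
          (fun j => PySem.Int.mod j 13 + 1)
        = (PySem.List.pyRange 0 (13*(n:Int)) 1).map (fun j => PySem.Int.mod j 13 + 1) := by
      rw [List.map_map]
      apply List.map_congr_left
      intro j hj
      have hb := (PySem.List.mem_pyRange_one).mp hj
      show PySem.Int.mod (13 + j) 13 + 1 = PySem.Int.mod j 13 + 1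
      rw [PySem.Int.mod_eq_emod_of_pos (by norm_num : (0:Int) < 13),
          PySem.Int.mod_eq_emod_of_pos (by norm_num : (0:Int) < 13)]
      omega
    have hheadY : (PySem.List.pyRange 0 13 1).map (fun j => y + PySem.Int.floordiv j 13)
        = List.replicate (PySem.List.pyRange 1 14 1).length y := by
      rw [show (PySem.List.pyRange 1 14 1).length = 13 by decide]
      rw [show (List.replicate 13 y) = (PySem.List.pyRange 0 13 1).map (fun _ => y) by
        rw [List.map_const']; congr 1]
      apply List.map_congr_left
      intro j hj
      have hb := (PySem.List.mem_pyRange_one).mp hj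
      rw [PySem.Int.floordiv_eq_ediv_of_pos (by norm_num : (0:Int) < 13)]
      omega
    have htailY : ((PySem.List.pyRange 0 (13*(n:Int)) 1).map (fun k => 13 + k)).map
          (fun j => y + PySem.Int.floordiv j 13)
        = (PySem.List.pyRange 0 (13*(n:Int)) 1).map (fun j => (y+1) + PySem.Int.floordiv j 13) := by
      rw [List.map_map]
      apply List.map_congr_left
      intro j hj
      have hb := (PySem.List.mem_pyRange_one).mp hj
      show y + PySem.Int.floordiv (13 + j) 13 = (y+1) + PySem.Int.floordiv j 13
      rw [PySem.Int.floordiv_eq_ediv_of_pos (by norm_num : (0:Int) < 13),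
          PySem.Int.floordiv_eq_ediv_of_pos (by norm_num : (0:Int) < 13)]
      omega
    simp only [chunks, ih (y+1), hcast, hsplit, hshift, List.map_append]
    rw [hheadP, htailP, hheadY, htailY]

theorem pyRange_max (ep : Int) :
    PySem.List.pyRange 0 (max ep 0) 1 = PySem.List.pyRange 0 ep 1 := by
  by_cases h : 0 ≤ ep
  · rw [max_eq_left h]
  · rw [max_eq_right (by omega : ep ≤ 0), PySem.List.pyRange_one_eq_nil le_rfl,
        PySem.List.pyRange_one_eq_nil (by omega : ep ≤ 0)]

-- the whole yd > 0 case of B equals chunks ++ final year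
theorem B_pairs (sp sy ep ey : Int) (hsp : sp ≤ 13) (m : Nat)
    (hm : (m:Int) = ey - sy - 1) :
    (((PySem.List.pyRange 0 ((14 - sp) + 13*(ey - sy - 1) + max ep 0) 1).map
        (entryB sp sy ey (14 - sp) (13*(ey - sy - 1)))).map Prod.fst,
     ((PySem.List.pyRange 0 ((14 - sp) + 13*(ey - sy - 1) + max ep 0) 1).map
        (entryB sp sy ey (14 - sp) (13*(ey - sy - 1)))).map Prod.snd)
      = ((chunks (m+1) sp sy).1 ++ PySem.List.pyRange 1 (ep+1) 1,
         (chunks (m+1) sp sy).2 ++ List.replicate (PySem.List.pyRange 1 (ep+1) 1).length ey) := by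
  set c0 : Int := 14 - sp with hc0
  set mid : Int := 13*(ey - sy - 1) with hmid
  have hc0pos : 1 ≤ c0 := by omega
  have hmidpos : 0 ≤ mid := by omega
  have hmid13 : mid = 13*(m:Int) := by omega
  have hsplit1 : PySem.List.pyRange 0 (c0 + mid + max ep 0) 1
      = PySem.List.pyRange 0 c0 1 ++ PySem.List.pyRange c0 (c0 + mid + max ep 0) 1 :=
    PySem.List.pyRange_one_append 0 c0 _ (by omega) (by omega)
  have hsplit2 : PySem.List.pyRange c0 (c0 + mid + max ep 0) 1
      = PySem.List.pyRange c0 (c0 + mid) 1 ++ PySem.List.pyRange (c0 + mid) (c0 + mid + max ep 0) 1 :=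
    PySem.List.pyRange_one_append c0 (c0 + mid) _ (by omega) (by omega)
  -- piece 1: start year
  have hp1 : (PySem.List.pyRange 0 c0 1).map (entryB sp sy ey c0 mid)
      = (PySem.List.pyRange 0 c0 1).map (fun k => (sp + k, sy)) := by
    apply List.map_congr_left
    intro k hk
    have hb := (PySem.List.mem_pyRange_one).mp hk
    simp only [entryB, if_pos hb.2]
  -- piece 2: interior years
  have hp2 : (PySem.List.pyRange c0 (c0 + mid) 1).map (entryB sp sy ey c0 mid)
      = (PySem.List.pyRange 0 mid 1).map
          (fun j => (PySem.Int.mod j 13 + 1, sy + 1 + PySem.Int.floordiv j 13)) := by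
    rw [shiftRange c0 (c0 + mid), show c0 + mid - c0 = mid by omega, List.map_map]
    apply List.map_congr_left
    intro j hj
    have hb := (PySem.List.mem_pyRange_one).mp hj
    show entryB sp sy ey c0 mid (c0 + j) = _
    simp only [entryB, if_neg (by omega : ¬ c0 + j < c0),
      show c0 + j - c0 = j by omega, if_pos hb.2]
  -- piece 3: final year
  have hp3 : (PySem.List.pyRange (c0 + mid) (c0 + mid + max ep 0) 1).map (entryB sp sy ey c0 mid)
      = (PySem.List.pyRange 0 (max ep 0) 1).map (fun t => (t + 1, ey)) := by
    rw [shiftRange (c0 + mid) (c0 + mid + max ep 0),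
        show c0 + mid + max ep 0 - (c0 + mid) = max ep 0 by omega, List.map_map]
    apply List.map_congr_left
    intro t ht
    have hb := (PySem.List.mem_pyRange_one).mp ht
    show entryB sp sy ey c0 mid (c0 + mid + t) = _
    simp only [entryB, if_neg (by omega : ¬ c0 + mid + t < c0),
      if_neg (by omega : ¬ c0 + mid + t - c0 < mid)]
    rw [Prod.mk.injEq]
    exact ⟨by omega, rfl⟩
  have hL : (PySem.List.pyRange 0 (c0 + mid + max ep 0) 1).map (entryB sp sy ey c0 mid)
      = (PySem.List.pyRange 0 c0 1).map (fun k => (sp + k, sy))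
        ++ ((PySem.List.pyRange 0 mid 1).map
              (fun j => (PySem.Int.mod j 13 + 1, sy + 1 + PySem.Int.floordiv j 13))
            ++ (PySem.List.pyRange 0 (max ep 0) 1).map (fun t => (t + 1, ey))) := by
    rw [hsplit1, List.map_append, hsplit2, List.map_append, hp1, hp2, hp3]
  -- fst/snd of each piece
  have hfst1 : ((PySem.List.pyRange 0 c0 1).map (fun k => ((sp + k : Int), sy))).map Prod.fst
      = PySem.List.pyRange sp 14 1 := by
    rw [List.map_map, shiftRange sp 14]
    rfl
  have hsnd1 : ((PySem.List.pyRange 0 c0 1).map (fun k => ((sp + k : Int), sy))).map Prod.snd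
      = List.replicate (PySem.List.pyRange sp 14 1).length sy := by
    rw [List.map_map,
      show (Prod.snd ∘ fun k => ((sp + k : Int), sy)) = (fun _ => sy) from rfl,
      List.map_const', PySem.List.length_pyRange_one, PySem.List.length_pyRange_one]
    congr 1
    omega
  have hfst2 : ((PySem.List.pyRange 0 mid 1).map
        (fun j => (PySem.Int.mod j 13 + 1, sy + 1 + PySem.Int.floordiv j 13))).map Prod.fst
      = (PySem.List.pyRange 0 (13*(m:Int)) 1).map (fun j => PySem.Int.mod j 13 + 1) := by
    rw [List.map_map, hmid13]
    rfl
  have hsnd2 : ((PySem.List.pyRange 0 mid 1).map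
        (fun j => (PySem.Int.mod j 13 + 1, sy + 1 + PySem.Int.floordiv j 13))).map Prod.snd
      = (PySem.List.pyRange 0 (13*(m:Int)) 1).map (fun j => (sy+1) + PySem.Int.floordiv j 13) := by
    rw [List.map_map, hmid13]
    rfl
  have hfst3 : ((PySem.List.pyRange 0 (max ep 0) 1).map (fun t => ((t + 1 : Int), ey))).map Prod.fst
      = PySem.List.pyRange 1 (ep+1) 1 := by
    rw [List.map_map, pyRange_max, shiftRange 1 (ep+1), show ep + 1 - 1 = ep by omega]
    apply List.map_congr_left
    intro t ht
    show t + 1 = 1 + t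
    omega
  have hsnd3 : ((PySem.List.pyRange 0 (max ep 0) 1).map (fun t => ((t + 1 : Int), ey))).map Prod.snd
      = List.replicate (PySem.List.pyRange 1 (ep+1) 1).length ey := by
    rw [List.map_map,
      show (Prod.snd ∘ fun t => ((t + 1 : Int), ey)) = (fun _ => ey) from rfl,
      List.map_const', PySem.List.length_pyRange_one, PySem.List.length_pyRange_one]
    congr 1
    omega
  have hchunks : chunks (m+1) sp sy
      = (PySem.List.pyRange sp 14 1 ++ (chunks m 1 (sy+1)).1,
         List.replicate (PySem.List.pyRange sp 14 1).length sy ++ (chunks m 1 (sy+1)).2) := rfl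
  rw [hL, List.map_append, List.map_append, List.map_append, List.map_append,
      hfst1, hfst2, hfst3, hsnd1, hsnd2, hsnd3, hchunks, chunks_mid m (sy+1)]
  rw [Prod.mk.injEq]
  exact ⟨by simp [List.append_assoc], by simp [List.append_assoc]⟩

theorem formPeriodRange_eq (period year : List Int)
    (h : Pre_formPeriodRange period year) :
    formPeriodRange period year = formPeriodRange_alt period year := by
  unfold formPeriodRange formPeriodRange_alt
  by_cases h1 : period.length = 1
  · simp [h1]
  · simp only [if_neg h1]
    set sp := PySem.List.pyGetD period 0 0 with hsp
    set sy := PySem.List.pyGetD year 0 0 with hsy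
    set ep := PySem.List.pyGetD period 1 0 with hep
    set ey := PySem.List.pyGetD year 1 0 with hey
    by_cases h2 : ey - sy < 0
    · rw [if_pos h2, if_pos h2]
    · rw [if_neg h2, if_neg h2]
      by_cases h3 : ey - sy = 0
      · rw [if_pos h3, if_pos h3]
        rw [foldl_append_pair]
        rw [shiftRange sp (ep+1), show ep + 1 - sp = ep - sp + 1 by ring]
        simp [List.length_map]
      · rw [if_neg h3, if_neg h3]
        have hsp13 : sp ≤ 13 := by
          rcases h with h | ⟨_, _, h⟩
          · exact absurd h h1
          · rcases h with h | h
            · omega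
            · exact h
        have hm : ((ey - sy).toNat - 1 : Int) + 1 = ey - sy := by omega
        obtain ⟨m, hm'⟩ : ∃ m : Nat, (ey - sy).toNat = m + 1 := ⟨(ey - sy).toNat - 1, by omega⟩
        rw [hm', loopA_chunks ey (m+1) sp sy [] [] hsp13 (by omega)]
        rw [foldl_append_pair]
        simp only [List.nil_append]
        exact (B_pairs sp sy ep ey hsp13 m (by omega)).symm

-- ===== VERDICT (by name: the statement is the Claim_ definition above) =====
theorem formPeriodRange_spec : Claim_equal_formPeriodRange := by
  intro period year _ hpre
  unfold Spec_formPeriodRange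
  exact formPeriodRange_eq period year hpre
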